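-- pv_equiv track=rewrite | github.com/DimaOanaTeodora/Advanced-Algorithms-Course | 6_monotonie_poligon.py | monotony
-- ===== SOURCE A (Python) =====
-- def monotony(n,points, axis):
--     minimum = points[0][axis]
--     position = 0
--     for i in range(1,n):
--         if points[i][axis] < minimum: # calculez axis-ul cel mai mic
--             minimum =points[i][axis]
--             position = i
--
--     rising = True # presupun ca este in crestere
--     last_point = points[position][axis] # plec de la punctul cu valoarea cea mai mica a axis
--     for j in range(1, n):
--         current = points[(j + position) % n][axis]
--         if current < last_point:
--             rising = False # scadere a valorilor => descrestere
--
--         if current > last_point and not rising: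
--             return False # crestere a valorilor dar nu are un precedent de crestere
--         last_point = current
--
--     return True
-- ===== SOURCE B (Python) =====
-- def monotony(n, points, axis):
--     if n <= 0:
--         return True
--     vals = [points[i][axis] for i in range(n)]
--     p = vals.index(min(vals))
--     s = vals[p:] + vals[:p]
--     pairs = list(zip(s, s[1:]))
--     while pairs and pairs[0][0] <= pairs[0][1]:
--         pairs.pop(0)
--     while pairs and pairs[0][1] <= pairs[0][0]:
--         pairs.pop(0)
--     return not pairs
-- ===== Notes on version B (the rewrite author's own statement) =====
-- stated objective: simpler
-- what changed: A's single rising-flag scan with early return is replaced by building the rotated value sequence explicitly and checking unimodality as two phases (drop the non-decreasing steps, then the non-increasing steps, succeed iff nothing is left).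
import Mathlib
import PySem

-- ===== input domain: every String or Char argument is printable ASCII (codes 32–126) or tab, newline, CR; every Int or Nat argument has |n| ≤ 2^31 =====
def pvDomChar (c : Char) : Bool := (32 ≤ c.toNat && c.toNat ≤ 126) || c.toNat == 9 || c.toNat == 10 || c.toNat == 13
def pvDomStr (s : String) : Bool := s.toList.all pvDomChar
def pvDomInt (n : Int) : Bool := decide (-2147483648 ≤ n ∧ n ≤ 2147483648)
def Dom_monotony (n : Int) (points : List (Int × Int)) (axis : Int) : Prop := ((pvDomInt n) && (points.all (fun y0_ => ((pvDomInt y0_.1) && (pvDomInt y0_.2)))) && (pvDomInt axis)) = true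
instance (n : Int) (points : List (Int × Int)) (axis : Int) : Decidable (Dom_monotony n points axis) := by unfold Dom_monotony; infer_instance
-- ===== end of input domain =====

-- B replaces A's rising-flag scan (early return) by building the rotated value sequence explicitly and checking unimodality in two phases; the return value is proved equal wherever the Python A returns.

-- ===== PORT A =====
-- points[i][axis]: tuple indexing; out-of-range (excluded by Pre_) defaults to 0
def getAxis (points : List (Int × Int)) (i axis : Int) : Int :=
  match PySem.List.pyGet? points i with
  | some q => (PySem.List.pyGet? [q.1, q.2] axis).getD 0
  | none => 0

-- A's second loop with its early 'return False'
def aLoop (points : List (Int × Int)) (axis n position : Int) : List Int → Bool → Int → Bool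
  | [], _rising, _last => true
  | j :: js, rising, last =>
    let current := getAxis points (PySem.Int.mod (j + position) n) axis
    let rising1 := if current < last then false else rising
    if current > last && !rising1 then false
    else aLoop points axis n position js rising1 current

def monotony (n : Int) (points : List (Int × Int)) (axis : Int) : Bool :=
  let mp := (PySem.List.pyRange 1 n 1).foldl
    (fun (mp : Int × Int) i =>
      if getAxis points i axis < mp.1 then (getAxis points i axis, i) else mp)
    (getAxis points 0 axis, 0)
  aLoop points axis n mp.2 (PySem.List.pyRange 1 n 1) true (getAxis points mp.2 axis)

-- ===== PORT B =====
-- the two while/pop loops of Source B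
def dropLe : List (Int × Int) → List (Int × Int)
  | [] => []
  | q :: rest => if q.1 ≤ q.2 then dropLe rest else q :: rest

def dropGe : List (Int × Int) → List (Int × Int)
  | [] => []
  | q :: rest => if q.2 ≤ q.1 then dropGe rest else q :: rest

def monotony_alt (n : Int) (points : List (Int × Int)) (axis : Int) : Bool :=
  if n ≤ 0 then true
  else
    let vals := (PySem.List.pyRange 0 n 1).map (fun i => getAxis points i axis)
    let m := (PySem.List.min? vals (fun x => x)).getD 0
    let p : Int := ((PySem.List.index? vals m).getD 0 : Nat)
    let s := PySem.List.slice vals (some p) none ++ PySem.List.slice vals none (some p)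
    (dropGe (dropLe (s.zip (PySem.List.slice s (some 1) none)))).isEmpty

-- ===== PRECONDITION & SPEC =====
-- Pre_: exactly the inputs where the Python A returns (otherwise IndexError: empty points, tuple index outside {-2,-1,0,1}, or n exceeding the list length)
def Pre_monotony (n : Int) (points : List (Int × Int)) (axis : Int) : Prop :=
  points ≠ [] ∧ n ≤ (points.length : Int) ∧ (axis = 0 ∨ axis = 1 ∨ axis = -1 ∨ axis = -2)
instance (n : Int) (points : List (Int × Int)) (axis : Int) : Decidable (Pre_monotony n points axis) := by unfold Pre_monotony; infer_instance

def pvWitness_monotony : Int × (List (Int × Int)) × Int := (3, [(0, 0), (1, 2), (0, 1)], 1)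

def Spec_monotony (n : Int) (points : List (Int × Int)) (axis : Int) (out : Bool) : Prop := out = monotony_alt n points axis
instance (n : Int) (points : List (Int × Int)) (axis : Int) (out : Bool) : Decidable (Spec_monotony n points axis out) := by unfold Spec_monotony; infer_instance

-- ===== CLAIM (what is proved, stated in full; the proofs are below) =====
def Claim_equal_monotony : Prop := ∀ (n : Int) (points : List (Int × Int)) (axis : Int), Dom_monotony n points axis → Pre_monotony n points axis → Spec_monotony n points axis (monotony n points axis)

-- ===== LEMMAS AND PROOFS =====

-- A's loop abstracted to the list of successive 'current' values
def riseA : Bool → Int → List Int → Bool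
  | _rising, _last, [] => true
  | rising, last, c :: cs =>
    let rising1 := if c < last then false else rising
    if c > last && !rising1 then false
    else riseA rising1 c cs

theorem aLoop_eq_riseA (points : List (Int × Int)) (axis n position : Int) :
    ∀ (js : List Int) (r : Bool) (l : Int),
      aLoop points axis n position js r l =
        riseA r l (js.map (fun j => getAxis points (PySem.Int.mod (j + position) n) axis)) := by
  intro js
  induction js with
  | nil => intro r l; rfl
  | cons j js ih => intro r l; simp only [aLoop, riseA, List.map]; split <;> simp [ih]

theorem riseA_false_eq (cs : List Int) : ∀ (last : Int),
    riseA false last cs = (dropGe ((last :: cs).zip cs)).isEmpty := by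
  induction cs with
  | nil => intro last; rfl
  | cons c cs ih =>
    intro last
    simp only [riseA, List.zip, List.zipWith, dropGe]
    by_cases h : c ≤ last
    · have h1 : ¬ c > last := by omega
      simp [h, h1, ih c, List.zip]
    · have h1 : c > last := by omega
      simp [h, h1]

theorem riseA_true_eq (cs : List Int) : ∀ (last : Int),
    riseA true last cs = (dropGe (dropLe ((last :: cs).zip cs))).isEmpty := by
  induction cs with
  | nil => intro last; rfl
  | cons c cs ih =>
    intro last
    simp only [riseA, List.zip, List.zipWith, dropLe]
    by_cases h : last ≤ c
    · have h1 : ¬ c < last := by omega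
      simp [h, h1, ih c, List.zip]
    · have h1 : c < last := by omega
      have h2 : ¬ c > last := by omega
      have h3 : c ≤ last := by omega
      simp [h, h1, h2, h3, dropGe, riseA_false_eq cs c, List.zip]

-- invariant of A's minimum/position fold: first occurrence of the minimum of v on [0, N]
theorem foldInv (v : Int → Int) : ∀ (N : Nat),
    0 ≤ ((PySem.List.pyRange 1 ((N:Int)+1) 1).foldl (fun (mp : Int×Int) i => if v i < mp.1 then (v i, i) else mp) (v 0, 0)).2 ∧
    ((PySem.List.pyRange 1 ((N:Int)+1) 1).foldl (fun (mp : Int×Int) i => if v i < mp.1 then (v i, i) else mp) (v 0, 0)).2 ≤ (N:Int) ∧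
    ((PySem.List.pyRange 1 ((N:Int)+1) 1).foldl (fun (mp : Int×Int) i => if v i < mp.1 then (v i, i) else mp) (v 0, 0)).1 =
      v ((PySem.List.pyRange 1 ((N:Int)+1) 1).foldl (fun (mp : Int×Int) i => if v i < mp.1 then (v i, i) else mp) (v 0, 0)).2 ∧
    (∀ j : Int, 0 ≤ j → j ≤ (N:Int) →
      ((PySem.List.pyRange 1 ((N:Int)+1) 1).foldl (fun (mp : Int×Int) i => if v i < mp.1 then (v i, i) else mp) (v 0, 0)).1 ≤ v j) ∧
    (∀ j : Int, 0 ≤ j → j < ((PySem.List.pyRange 1 ((N:Int)+1) 1).foldl (fun (mp : Int×Int) i => if v i < mp.1 then (v i, i) else mp) (v 0, 0)).2 →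
      ((PySem.List.pyRange 1 ((N:Int)+1) 1).foldl (fun (mp : Int×Int) i => if v i < mp.1 then (v i, i) else mp) (v 0, 0)).1 < v j) := by
  intro N
  induction N with
  | zero =>
    rw [PySem.List.pyRange_one_eq_nil (by norm_num)]
    simp only [List.foldl_nil]
    refine ⟨by trivial, by trivial, by trivial, ?_, ?_⟩
    · intro j h0 h1; have hj : j = 0 := by omega
      simp [hj]
    · intro j h0 h1
      have hj : j < 0 := h1
      omega
  | succ N ih =>
    have hcast : ((N+1:Nat):Int) + 1 = ((N:Int)+1) + 1 := by push_cast; ring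
    rw [hcast, PySem.List.pyRange_one_succ_right (by omega : (1:Int) ≤ (N:Int)+1), List.foldl_append]
    set mp := (PySem.List.pyRange 1 ((N:Int)+1) 1).foldl (fun (mp : Int×Int) i => if v i < mp.1 then (v i, i) else mp) (v 0, 0) with hmp
    obtain ⟨i1, i2, i3, i4, i5⟩ := ih
    simp only [List.foldl_cons, List.foldl_nil]
    by_cases hlt : v ((N:Int)+1) < mp.1
    · simp only [if_pos hlt]
      refine ⟨by omega, by push_cast; omega, by trivial, ?_, ?_⟩
      · intro j h0 h1
        by_cases hj : j ≤ (N:Int)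
        · have := i4 j h0 hj; omega
        · have hj2 : j = (N:Int)+1 := by push_cast at h1; omega
          simp [hj2]
      · intro j h0 h1
        have := i4 j h0 (by omega); omega
    · simp only [if_neg hlt]
      refine ⟨i1, by push_cast; omega, i3, ?_, i5⟩
      intro j h0 h1
      by_cases hj : j ≤ (N:Int)
      · exact i4 j h0 hj
      · have hj2 : j = (N:Int)+1 := by push_cast at h1; omega
        rw [hj2]; omega

theorem valsGet (v : Int → Int) (n : Int) (k : Nat) (hk : k < ((PySem.List.pyRange 0 n 1).map v).length) :
    ((PySem.List.pyRange 0 n 1).map v)[k] = v (k : Int) := by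
  rw [List.getElem_map, PySem.List.getElem_pyRange_one]
  norm_num

-- rotating by p is re-indexing modulo n
theorem rotEq (v : Int → Int) (n p : Int) (hn : 0 < n) (hp0 : 0 ≤ p) (hpn : p < n) :
    ((PySem.List.pyRange 0 n 1).map v).drop p.toNat ++ ((PySem.List.pyRange 0 n 1).map v).take p.toNat
      = (PySem.List.pyRange 0 n 1).map (fun j => v (PySem.Int.mod (j + p) n)) := by
  set vals := (PySem.List.pyRange 0 n 1).map v with hvals
  have hvlen : vals.length = n.toNat := by
    rw [hvals, List.length_map, PySem.List.length_pyRange_one]; norm_num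
  have hdl : (vals.drop p.toNat).length = n.toNat - p.toNat := by simp [hvlen]
  apply List.ext_getElem
  · simp [PySem.List.length_pyRange_one, hvlen]; omega
  · intro k h1 h2
    have hk : k < n.toNat := by
      simpa [PySem.List.length_pyRange_one] using h2
    rw [List.getElem_map, PySem.List.getElem_pyRange_one]
    rw [PySem.Int.mod_eq_emod_of_pos hn]
    by_cases hcase : k < n.toNat - p.toNat
    · rw [List.getElem_append_left (by omega : k < (vals.drop p.toNat).length)]
      rw [List.getElem_drop]
      rw [valsGet v n (p.toNat + k) (by rw [← hvals]; omega)]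
      have harg : (0 + (k:Int) + p) % n = ((p.toNat + k : Nat) : Int) := by
        rw [Int.emod_eq_of_lt (by omega) (by omega)]
        omega
      rw [harg]
    · rw [List.getElem_append_right (by omega : (vals.drop p.toNat).length ≤ k)]
      rw [List.getElem_take]
      rw [valsGet v n (k - (vals.drop p.toNat).length) (by rw [← hvals]; omega)]
      have harg : (0 + (k:Int) + p) % n = (k:Int) + p - n := by
        have hx : 0 + (k:Int) + p = ((k:Int) + p - n) + n := by ring
        rw [hx, Int.add_emod_right, Int.emod_eq_of_lt (by omega) (by omega)]
      rw [harg]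
      congr 1
      omega

-- the abstract bridge: A's scan from the fold's minimum position = B's two-phase check
theorem coreEq (v : Int → Int) (n : Int) (hn0 : 0 < n) :
    (let mp := (PySem.List.pyRange 1 n 1).foldl (fun (mp : Int × Int) i => if v i < mp.1 then (v i, i) else mp) (v 0, 0);
     riseA true (v mp.2) ((PySem.List.pyRange 1 n 1).map (fun j => v (PySem.Int.mod (j + mp.2) n))))
    =
    (let vals := (PySem.List.pyRange 0 n 1).map v;
     let m := (PySem.List.min? vals (fun x => x)).getD 0;
     let p : Int := ((PySem.List.index? vals m).getD 0 : Nat);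
     let s := PySem.List.slice vals (some p) none ++ PySem.List.slice vals none (some p);
     (dropGe (dropLe (s.zip (PySem.List.slice s (some 1) none)))).isEmpty) := by
  simp only []
  set mp := (PySem.List.pyRange 1 n 1).foldl (fun (mp : Int × Int) i => if v i < mp.1 then (v i, i) else mp) (v 0, 0) with hmp
  set vals := (PySem.List.pyRange 0 n 1).map v with hvals
  -- fold invariant
  have hK : ((n-1).toNat : Int) + 1 = n := by omega
  have inv := foldInv v (n-1).toNat
  rw [hK, ← hmp] at inv
  obtain ⟨i1, i2, i3, i4, i5⟩ := inv
  have i2' : mp.2 < n := by omega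
  -- vals facts
  have hvlen : vals.length = n.toNat := by
    rw [hvals, List.length_map, PySem.List.length_pyRange_one]; norm_num
  have hvne : vals ≠ [] := by
    intro h; rw [h] at hvlen; simp at hvlen; omega
  -- the minimum value
  obtain ⟨m, hm⟩ : ∃ m, PySem.List.min? vals (fun x => x) = some m := by
    cases h : PySem.List.min? vals (fun x => x) with
    | none => exact absurd ((PySem.List.min?_eq_none_iff vals (fun x => x)).mp h) hvne
    | some m => exact ⟨m, rfl⟩
  have hmin : ∀ y ∈ vals, m ≤ y := by
    intro y hy; exact PySem.List.min?_isMin hm y hy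
  obtain ⟨km, hkm, hkmv⟩ := List.mem_iff_getElem.mp (PySem.List.min?_mem hm)
  -- m equals the fold's minimum
  have hgV : ∀ (k : Nat) (hk : k < vals.length), vals[k]'hk = v (k : Int) := by
    intro k hk; exact valsGet v n k hk
  have hm2 : vals[mp.2.toNat]'(by omega) = v mp.2 := by
    rw [hgV mp.2.toNat (by omega)]
    congr 1; omega
  have hmm : m = mp.1 := by
    apply le_antisymm
    · rw [i3, ← hm2]; exact hmin _ (List.getElem_mem _)
    · rw [← hkmv, hgV km hkm]
      exact i4 (km : Int) (by omega) (by omega)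
  -- the first index of m
  obtain ⟨i, hi⟩ : ∃ i, List.idxOf? m vals = some i := by
    cases h : List.idxOf? m vals with
    | none =>
      rw [List.idxOf?_eq_none_iff] at h
      exact absurd (List.mem_iff_getElem.mpr ⟨km, hkm, hkmv⟩) (by simpa using h)
    | some i => exact ⟨i, rfl⟩
  obtain ⟨hilen, hival, hifirst⟩ := List.idxOf?_eq_some_iff.mp hi
  have hiv : vals[i]'hilen = v (i : Int) := hgV i hilen
  -- it coincides with the fold's position
  have hip : (i : Int) = mp.2 := by
    by_contra hne
    rcases lt_or_gt_of_ne hne with hlt | hgt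
    · have := i5 (i : Int) (by omega) hlt
      rw [← hiv, hival, hmm] at this
      omega
    · have hj : mp.2.toNat < i := by omega
      exact hifirst mp.2.toNat hj (by rw [hm2, ← i3, ← hmm])
  -- rewrite B's p and s
  rw [hm]
  simp only [Option.getD_some]
  rw [PySem.List.index?_eq_idxOf?, hi]
  simp only [Option.getD_some]
  rw [PySem.List.slice_from vals (by omega : (0:Int) ≤ (i:Nat)),
      PySem.List.slice_to vals (by omega : (0:Int) ≤ (i:Nat))]
  have hrot := rotEq v n (i : Int) hn0 (by omega) (by omega : (i:Int) < n)
  rw [Int.toNat_natCast] at hrot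
  simp only [Int.toNat_natCast]
  rw [hvals, hrot, hip]
  -- peel off the head of the rotated list
  rw [PySem.List.pyRange_one_cons hn0]
  simp only [List.map_cons]
  have hhead : PySem.Int.mod (0 + mp.2) n = mp.2 := by
    rw [PySem.Int.mod_eq_emod_of_pos hn0, Int.emod_eq_of_lt (by omega) (by omega)]
    omega
  rw [hhead]
  rw [PySem.List.slice_from_one]
  simp only [List.tail_cons]
  rw [riseA_true_eq]
  norm_num

-- ===== VERDICT (by name: the statement is the Claim_ definition above) =====
theorem monotony_spec : Claim_equal_monotony := by
  intro n points axis _hdom _hpre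
  unfold Spec_monotony
  by_cases hn : n ≤ 0
  · simp [monotony, monotony_alt, hn, PySem.List.pyRange_one_eq_nil (show n ≤ (1:Int) by omega), aLoop]
  · have hn0 : 0 < n := by omega
    have h := coreEq (fun i => getAxis points i axis) n hn0
    simp only [] at h
    unfold monotony monotony_alt
    rw [if_neg hn]
    rw [aLoop_eq_riseA]
    exact h
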